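-- pv_equiv track=rewrite | github.com/guldasahmet/hamming_sec_ded_code_simulator | utils.py | format_hamming_code
-- ===== SOURCE A (Python) =====
-- def format_hamming_code(code):
--     """
--     Hamming kodunu parçalara ayırarak okunabilir hale getir.
--     Dinamik olarak parite (P) ve veri (D) bitlerini etiketler.
--     Global parite (GP) en sondadır.
--     """
--     if not code:
--         return "Boş Kod"
--
--     if len(code) < 1:
--         return code
--
--     # Global parite bitini ayır (son bit)
--     global_parity_bit = code[-1]
--     encoded_part = code[:-1] # Veri ve diğer parite bitleri (1-based index gibi düşünülecek)
--
--     # Parite bit pozisyonlarını bul (2'nin kuvvetleri)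
--     parity_positions = []
--     p_power = 0
--     while (2**p_power) <= len(encoded_part):
--         parity_positions.append(2**p_power)
--         p_power += 1
--
--     formatted_parts = []
--     data_bit_counter = 1
--
--     for i in range(1, len(encoded_part) + 1): # 1-based index
--         bit = encoded_part[i-1] # Python 0-based index
--         if i in parity_positions:
--             formatted_parts.append(f"P{i}:{bit}")
--         else:
--             formatted_parts.append(f"D{data_bit_counter}:{bit}")
--             data_bit_counter += 1
--
--     formatted_parts.append(f"GP:{global_parity_bit}")
--     return ' '.join(formatted_parts)
-- ===== SOURCE B (Python) =====
-- def format_hamming_code(code):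
--     if not code:
--         return "Boş Kod"
--
--     def label(i, bit):
--         # stateless closed-form label for 1-based position i:
--         # i is a parity position iff it is a power of two, i.e. i == 1 << (bit_length-1);
--         # otherwise its data index is i minus the number of parity positions <= i,
--         # which is exactly i.bit_length().
--         bl = i.bit_length()
--         if i == 1 << (bl - 1):
--             return f"P{i}:{bit}"
--         return f"D{i - bl}:{bit}"
--
--     parts = [label(i, b) for i, b in enumerate(code[:-1], 1)]
--     return ' '.join(parts + [f"GP:{code[-1]}"])
-- ===== Notes on version B (the rewrite author's own statement) =====
-- stated objective: alternative
-- what changed: B makes the labelling stateless: A precomputes a parity-position table with a while-loop and threads a mutable data_bit_counter through its loop, while B maps one pure closed-form function over enumerate(code[:-1],1) - parity iff i == 1 << (i.bit_length()-1), data index = i - i.bit_length() - so neither the table nor the running counter exists.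
import Mathlib
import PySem

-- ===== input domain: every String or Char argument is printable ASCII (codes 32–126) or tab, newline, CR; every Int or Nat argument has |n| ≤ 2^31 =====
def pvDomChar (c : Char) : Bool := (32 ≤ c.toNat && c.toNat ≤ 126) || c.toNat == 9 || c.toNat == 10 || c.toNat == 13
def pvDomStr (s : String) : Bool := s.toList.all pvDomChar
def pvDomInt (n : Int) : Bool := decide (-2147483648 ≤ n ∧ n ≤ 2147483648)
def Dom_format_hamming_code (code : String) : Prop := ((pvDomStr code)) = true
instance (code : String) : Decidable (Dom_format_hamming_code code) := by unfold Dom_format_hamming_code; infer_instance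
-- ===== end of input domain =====

-- B makes the labelling stateless: no parity-position table and no running data counter;
-- each position's label is a pure closed-form function of the position (objective: alternative).

-- ===== PORT A =====
-- while (2**p_power) <= len(encoded_part): parity_positions.append(2**p_power); p_power += 1
-- (fuel = n + 1 only makes the while-loop total; it is never exhausted since 2^pw grows past n)
def fhcPowers (n pw fuel : Nat) : List Nat :=
  match fuel with
  | 0 => []
  | fuel + 1 => if 2 ^ pw ≤ n then 2 ^ pw :: fhcPowers n (pw + 1) fuel else []

-- the for-loop over range(1, len(encoded_part)+1) with state (formatted_parts, data_bit_counter)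
def fhcLoopA (pps : List Nat) : List Char → Nat → Nat → List String
  | [], _, _ => []
  | bit :: rest, i, d =>
    if i ∈ pps then
      ("P" ++ PySem.Int.toStr (i : Int) ++ ":" ++ String.singleton bit) :: fhcLoopA pps rest (i + 1) d
    else
      ("D" ++ PySem.Int.toStr (d : Int) ++ ":" ++ String.singleton bit) :: fhcLoopA pps rest (i + 1) (d + 1)

def format_hamming_code (code : String) : String :=
  let cs := code.toList
  if cs.length = 0 then "Boş Kod"
  else if cs.length < 1 then code   -- dead branch kept from A
  else
    let globalParityBit := cs.getLastD ' '      -- code[-1], cs nonempty here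
    let encodedPart := cs.dropLast              -- code[:-1]
    let pps := fhcPowers encodedPart.length 0 (encodedPart.length + 1)
    let parts := fhcLoopA pps encodedPart 1 1 ++ ["GP:" ++ String.singleton globalParityBit]
    PySem.Str.join " " parts

-- ===== PORT B =====
-- the pure label function (Python's i.bit_length() is Nat.size)
def fhcLabel (p : Int × Char) : String :=
  let i := p.1
  let bl := Nat.size i.toNat
  if i = 2 ^ (bl - 1) then
    "P" ++ PySem.Int.toStr i ++ ":" ++ String.singleton p.2
  else
    "D" ++ PySem.Int.toStr (i - (bl : Int)) ++ ":" ++ String.singleton p.2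

def format_hamming_code_alt (code : String) : String :=
  let cs := code.toList
  if cs.length = 0 then "Boş Kod"
  else
    let parts := (PySem.List.enumerate cs.dropLast 1).map fhcLabel
    PySem.Str.join " " (parts ++ ["GP:" ++ String.singleton (cs.getLastD ' ')])

-- ===== PRECONDITION & SPEC =====
def Spec_format_hamming_code (code : String) (out : String) : Prop := out = format_hamming_code_alt code
instance (code : String) (out : String) : Decidable (Spec_format_hamming_code code out) := by unfold Spec_format_hamming_code; infer_instance

-- ===== CLAIM (what is proved, stated in full; the proofs are below) =====
def Claim_equal_format_hamming_code : Prop := ∀ (code : String), Dom_format_hamming_code code → Spec_format_hamming_code code (format_hamming_code code)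

-- ===== LEMMAS AND PROOFS =====

-- membership in A's parity-position table, given enough fuel
lemma mem_fhcPowers : ∀ (fuel pw n j : Nat), n < 2 ^ (pw + fuel) →
    (j ∈ fhcPowers n pw fuel ↔ ∃ q, pw ≤ q ∧ j = 2 ^ q ∧ j ≤ n) := by
  intro fuel
  induction fuel with
  | zero =>
    intro pw n j h
    simp only [fhcPowers, List.not_mem_nil, false_iff]
    rw [Nat.add_zero] at h
    rintro ⟨q, hq, rfl, hle⟩
    have : 2 ^ pw ≤ 2 ^ q := Nat.pow_le_pow_right (by norm_num) hq
    omega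
  | succ fuel ih =>
    intro pw n j h
    simp only [fhcPowers]
    split_ifs with hle
    · simp only [List.mem_cons]
      rw [ih (pw + 1) n j (by rw [show pw + 1 + fuel = pw + (fuel + 1) by omega]; exact h)]
      constructor
      · rintro (rfl | ⟨q, hq, rfl, hqle⟩)
        · exact ⟨pw, le_refl _, rfl, hle⟩
        · exact ⟨q, by omega, rfl, hqle⟩
      · rintro ⟨q, hq, rfl, hqle⟩
        rcases Nat.eq_or_lt_of_le hq with rfl | hlt
        · exact Or.inl rfl
        · exact Or.inr ⟨q, by omega, rfl, hqle⟩
    · simp only [List.not_mem_nil, false_iff]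
      rintro ⟨q, hq, rfl, hqle⟩
      have : 2 ^ pw ≤ 2 ^ q := Nat.pow_le_pow_right (by norm_num) hq
      omega

-- size is constant across a non-power-of-two step: for i ≥ 1 not a power of two,
-- Nat.size (i - 1) = Nat.size i
lemma size_pred_of_not_pow {i : Nat} (h1 : 1 ≤ i) (hnp : ¬ ∃ q, i = 2 ^ q) :
    Nat.size (i - 1) = Nat.size i := by
  have hs1 : 1 ≤ Nat.size i := Nat.lt_size.mpr (by simpa using h1)
  have hlow : 2 ^ (Nat.size i - 1) ≤ i := Nat.lt_size.mp (by omega)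
  have hhigh : i < 2 ^ Nat.size i := Nat.size_le.mp (le_refl _)
  have hne : i ≠ 2 ^ (Nat.size i - 1) := fun he => hnp ⟨_, he⟩
  apply le_antisymm
  · exact Nat.size_le.mpr (by omega)
  · have h2 : Nat.size i - 1 < Nat.size (i - 1) := Nat.lt_size.mpr (by omega)
    omega

-- size drops by one below a power of two: Nat.size (2 ^ q - 1) = q
lemma size_pow_pred (q : Nat) : Nat.size (2 ^ q - 1) = q := by
  rcases Nat.eq_zero_or_pos q with rfl | hq
  · simp [Nat.size_zero]
  · have h1 : 2 ^ (q - 1) < 2 ^ q := Nat.pow_lt_pow_right (by norm_num) (by omega)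
    apply le_antisymm
    · exact Nat.size_le.mpr (by have := Nat.one_le_two_pow (n := q); omega)
    · have h2 : q - 1 < Nat.size (2 ^ q - 1) := Nat.lt_size.mpr (by omega)
      omega

-- the two labellings agree: A's stateful loop over the table equals B's stateless map,
-- under the invariant d + size (i - 1) = i (d = running data counter)
lemma loops_agree : ∀ (enc : List Char) (n i d : Nat), 1 ≤ i → i + enc.length ≤ n + 1 →
    d + Nat.size (i - 1) = i →
    fhcLoopA (fhcPowers n 0 (n + 1)) enc i d = (PySem.List.enumerate enc (i : Int)).map fhcLabel := by
  intro enc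
  induction enc with
  | nil => intro n i d _ _ _; simp [fhcLoopA, PySem.List.enumerate_nil]
  | cons bit rest ih =>
    intro n i d hi hlen hinv
    have hfuel : n < 2 ^ (0 + (n + 1)) := by
      calc n < 2 ^ n := Nat.lt_two_pow_self
        _ ≤ 2 ^ (0 + (n + 1)) := Nat.pow_le_pow_right (by norm_num) (by omega)
    have hin : i ≤ n := by simp at hlen; omega
    have hlen' : i + 1 + rest.length ≤ n + 1 := by simp at hlen; omega
    have hmem : (i ∈ fhcPowers n 0 (n + 1)) ↔ ∃ q, i = 2 ^ q := by
      rw [mem_fhcPowers (n + 1) 0 n i hfuel]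
      constructor
      · rintro ⟨q, _, rfl, _⟩; exact ⟨q, rfl⟩
      · rintro ⟨q, rfl⟩; exact ⟨q, Nat.zero_le _, rfl, hin⟩
    have htoNat : ((i : Int)).toNat = i := Int.toNat_natCast i
    rw [PySem.List.enumerate_cons]
    simp only [fhcLoopA, List.map_cons, fhcLabel, htoNat]
    have hcast : (i : Int) + 1 = ((i + 1 : Nat) : Int) := by push_cast; ring
    by_cases hpow : ∃ q, i = 2 ^ q
    · have hsz1 : Nat.size (i - 1) = Nat.size i - 1 := by
        obtain ⟨q, rfl⟩ := hpow; rw [Nat.size_pow, size_pow_pred]; omega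
      have hs1 : 1 ≤ Nat.size i := Nat.lt_size.mpr (by simpa using hi)
      have hcond : (i : Int) = 2 ^ (Nat.size i - 1) := by
        obtain ⟨q, rfl⟩ := hpow
        rw [Nat.size_pow, Nat.add_sub_cancel]; push_cast; ring
      have hinv' : d + Nat.size (i + 1 - 1) = i + 1 := by
        simp only [Nat.add_sub_cancel]; omega
      rw [if_pos (hmem.mpr hpow), if_pos hcond, hcast,
          ih n (i + 1) d (by omega) hlen' hinv']
    · have hszp : Nat.size (i - 1) = Nat.size i := size_pred_of_not_pow hi hpow
      have hcond : ¬ ((i : Int) = 2 ^ (Nat.size i - 1)) := by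
        intro he
        exact hpow ⟨Nat.size i - 1, by exact_mod_cast he⟩
      have hd : (i : Int) - (Nat.size i : Int) = (d : Int) := by
        rw [← hszp]; omega
      have hinv' : (d + 1) + Nat.size (i + 1 - 1) = i + 1 := by
        simp only [Nat.add_sub_cancel]; omega
      rw [if_neg (fun h => hpow (hmem.mp h)), if_neg hcond, hd, hcast,
          ih n (i + 1) (d + 1) (by omega) hlen' hinv']

-- ===== VERDICT (by name: the statement is the Claim_ definition above) =====
theorem format_hamming_code_spec : Claim_equal_format_hamming_code := by
  intro code _
  unfold Spec_format_hamming_code format_hamming_code format_hamming_code_alt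
  by_cases h : code.toList.length = 0
  · simp [h]
  · simp only [h, if_false, if_neg (by omega : ¬ code.toList.length < 1)]
    rw [loops_agree code.toList.dropLast code.toList.dropLast.length 1 1 (le_refl 1) (by omega)
          (by simp [Nat.size_zero])]
    norm_num
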